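-- pv_equiv track=rewrite | github.com/paneltime/paneltime | paneltime/output.py | remove_illegal_signs
-- ===== SOURCE A (Python) =====
-- def remove_illegal_signs(name):
-- 	illegals=['#', 	'<', 	'$', 	'+',
-- 	          '%', 	'>', 	'!', 	'`',
-- 	          '&', 	'*', 	'‘', 	'|',
-- 	          '{', 	'?', 	'“', 	'=',
-- 	          '}', 	'/', 	':',
-- 	          '\\', 	'b']
-- 	for i in illegals:
-- 		if i in name:
-- 			name=name.replace(i,'_')
-- 	return name
-- ===== SOURCE B (Python) =====
-- def remove_illegal_signs(name):
-- 	illegal = set('#<$+%>!`&*\u2018|{?\u201c=}/:\\b')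
-- 	return ''.join('_' if c in illegal else c for c in name)
-- ===== Notes on version B (the rewrite author's own statement) =====
-- stated objective: idiomatic
-- what changed: B builds the illegal-character set once and makes a single left-to-right pass over name, emitting an underscore for illegal characters, instead of A's 21 separate full-string membership scans and replace passes.
import Mathlib
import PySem

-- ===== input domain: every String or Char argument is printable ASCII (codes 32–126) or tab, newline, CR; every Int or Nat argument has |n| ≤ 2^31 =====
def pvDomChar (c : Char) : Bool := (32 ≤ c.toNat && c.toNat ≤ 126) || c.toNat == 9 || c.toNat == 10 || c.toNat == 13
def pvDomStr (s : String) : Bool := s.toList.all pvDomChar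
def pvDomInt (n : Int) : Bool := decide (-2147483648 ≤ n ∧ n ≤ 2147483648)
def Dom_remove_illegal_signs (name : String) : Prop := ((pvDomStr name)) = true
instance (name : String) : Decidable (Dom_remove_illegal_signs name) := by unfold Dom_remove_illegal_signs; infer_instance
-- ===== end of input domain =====

-- B replaces A's 21 one-per-illegal-character full-string .replace scans with one pass over
-- `name` against a set built once (idiomatic single-pass rewrite; same results).


-- ===== PORT A =====
def illegalsA : List String :=
  ["#", "<", "$", "+",
   "%", ">", "!", "`",
   "&", "*", "‘", "|",
   "{", "?", "“", "=",
   "}", "/", ":",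
   "\\", "b"]

def remove_illegal_signs (name : String) : String :=
  illegalsA.foldl (fun n i => if PySem.Str.isIn i n then PySem.Str.replace n i "_" else n) name

-- ===== PORT B =====
def illegalSet : PySem.Set Char :=
  PySem.Set.ofList ['#', '<', '$', '+', '%', '>', '!', '`', '&', '*', '‘', '|',
                    '{', '?', '“', '=', '}', '/', ':', '\\', 'b']

def remove_illegal_signs_alt (name : String) : String :=
  String.ofList (name.toList.map (fun c => if illegalSet.contains c then '_' else c))

-- ===== PRECONDITION & SPEC =====
def Spec_remove_illegal_signs (name : String) (out : String) : Prop := out = remove_illegal_signs_alt name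
instance (name : String) (out : String) : Decidable (Spec_remove_illegal_signs name out) := by unfold Spec_remove_illegal_signs; infer_instance

-- ===== CLAIM (what is proved, stated in full; the proofs are below) =====
def Claim_equal_remove_illegal_signs : Prop := ∀ (name : String), Dom_remove_illegal_signs name → Spec_remove_illegal_signs name (remove_illegal_signs name)

-- ===== LEMMAS AND PROOFS =====

-- substituting one char c by r, applied to a whole string
def substChar (c r : Char) : Char → Char := fun x => if x = c then r else x

-- sequential substitution by every char of il (the per-character effect of A's replace chain)
def chainSubst (il : List Char) (x : Char) : Char :=
  il.foldl (fun y c => substChar c '_' y) x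

theorem replace_go_single (c r : Char) :
    ∀ (l : List Char) (fuel : Nat) (acc : List Char), l.length ≤ fuel →
      PySem.Chars.replace.go [c] [r] fuel l acc = acc.reverse ++ l.map (substChar c r) := by
  intro l
  induction l with
  | nil =>
    intro fuel acc _
    cases fuel <;> simp [PySem.Chars.replace.go]
  | cons x t ih =>
    intro fuel acc hle
    cases fuel with
    | zero => simp at hle
    | succ fm =>
      by_cases hx : x = c
      · subst hx
        have : List.isPrefixOf [x] (x :: t) = true := by
          simp [List.isPrefixOf]
        simp only [PySem.Chars.replace.go, this, if_pos]
        show PySem.Chars.replace.go [x] [r] fm t (r :: acc) = _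
        rw [ih fm (r :: acc) (by simpa using Nat.le_of_succ_le_succ hle)]
        simp [substChar]
      · have : List.isPrefixOf [c] (x :: t) = false := by
          simp [List.isPrefixOf]
          intro h; exact absurd h.symm hx
        simp only [PySem.Chars.replace.go, this, Bool.false_eq_true, if_neg, not_false_iff]
        rw [ih fm (x :: acc) (by simpa using Nat.le_of_succ_le_succ hle)]
        simp [substChar, hx]

theorem replace_single (cs : List Char) (c r : Char) :
    PySem.Chars.replace cs [c] [r] = cs.map (substChar c r) := by
  simp only [PySem.Chars.replace, List.isEmpty]
  rw [replace_go_single c r cs cs.length [] (le_refl _)]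
  simp

-- one step of A's loop, on a single-character pattern, is a per-character map
theorem stepA_single (c : Char) (n : String) :
    (if PySem.Str.isIn (String.ofList [c]) n
       then PySem.Str.replace n (String.ofList [c]) "_" else n)
      = String.ofList (n.toList.map (substChar c '_')) := by
  by_cases h : PySem.Str.isIn (String.ofList [c]) n = true
  · rw [if_pos h]
    show String.ofList (PySem.Chars.replace n.toList
      (String.ofList [c]).toList ("_").toList) = _
    have h1 : (String.ofList [c]).toList = [c] := by simp
    have h2 : ("_" : String).toList = ['_'] := by decide
    rw [h1, h2, replace_single]
  · rw [if_neg h]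
    have h4 : c ∉ n.toList := by
      intro hc
      apply h
      rw [PySem.Str.isIn_iff_infix]
      simpa using (List.singleton_infix_iff c n.toList).mpr hc
    have h5 : n.toList.map (substChar c '_') = n.toList := by
      rw [show n.toList.map (substChar c '_') = n.toList.map id from
            List.map_congr_left ?_, List.map_id]
      intro x hx
      exact if_neg (fun hxc => absurd (hxc ▸ hx) h4)
    rw [h5, String.ofList_toList]

-- A's whole loop, over any list of single-character patterns, is one map of chainSubst
theorem foldA_eq_map (il : List Char) :
    ∀ (s : String),
      (il.foldl (fun n c => if PySem.Str.isIn (String.ofList [c]) n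
                              then PySem.Str.replace n (String.ofList [c]) "_" else n) s)
        = String.ofList (s.toList.map (chainSubst il)) := by
  induction il with
  | nil =>
    intro s
    have : chainSubst [] = id := rfl
    rw [List.foldl_nil, this, List.map_id, String.ofList_toList]
  | cons c t ih =>
    intro s
    rw [List.foldl_cons, stepA_single, ih]
    simp only [String.toList_ofList, List.map_map]
    rfl

-- chainSubst over a list not containing '_' is exactly B's set test
theorem chainSubst_eq (il : List Char) (h : '_' ∉ il) (x : Char) :
    chainSubst il x = if il.contains x then '_' else x := by
  induction il generalizing x with
  | nil => simp [chainSubst]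
  | cons c t ih =>
    have h' : '_' ∉ t := fun hm => h (List.mem_cons_of_mem _ hm)
    have hstep : chainSubst (c :: t) x = chainSubst t (substChar c '_' x) := rfl
    by_cases hx : x = c
    · subst hx
      rw [hstep]
      simp only [substChar, if_pos]
      rw [ih h']
      simp
    · rw [hstep]
      simp only [substChar, if_neg hx]
      rw [ih h']
      simp [hx]

-- the literal pattern list of A is the single-char strings of B's char set
set_option maxRecDepth 100000 in
theorem illegalsA_eq : illegalsA = illegalSet.map (fun c => String.ofList [c]) := by decide

theorem underscore_not_illegal : '_' ∉ illegalSet := by decide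

-- ===== VERDICT (by name: the statement is the Claim_ definition above) =====
theorem remove_illegal_signs_spec : Claim_equal_remove_illegal_signs := by
  intro name _
  show remove_illegal_signs name = remove_illegal_signs_alt name
  unfold remove_illegal_signs remove_illegal_signs_alt
  rw [illegalsA_eq, List.foldl_map, foldA_eq_map]
  have hfun : chainSubst illegalSet = fun c => if illegalSet.contains c then '_' else c :=
    funext (chainSubst_eq illegalSet underscore_not_illegal)
  rw [hfun]
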